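-- pv_equiv track=rewrite | github.com/inda-xx/james-task8 | scripts/generate_task_description.py | split_task_into_exercises
-- ===== SOURCE A (Python) =====
-- def split_task_into_exercises(task_content):
--     # This function splits the task content into separate exercises
--     # For simplicity, let's assume that each exercise starts with '#### Exercise'
--     exercises = []
--     lines = task_content.split('\n')
--     current_exercise = []
--     in_exercise = False
--     for line in lines:
--         if line.strip().startswith('#### Exercise'):
--             if current_exercise:
--                 exercises.append('\n'.join(current_exercise))
--                 current_exercise = []
--             in_exercise = True
--         if in_exercise:
--             current_exercise.append(line)
--     if current_exercise:
--         exercises.append('\n'.join(current_exercise))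
--     return exercises
-- ===== SOURCE B (Python) =====
-- def _is_marker(line):
--     return line.strip().startswith('#### Exercise')
--
--
-- def split_task_into_exercises(task_content):
--     lines = task_content.split('\n')
--     return _chunks(_drop_preamble(lines))
--
--
-- def _drop_preamble(lines):
--     i = 0
--     while i < len(lines) and not _is_marker(lines[i]):
--         i += 1
--     return lines[i:]
--
--
-- def _chunks(lines):
--     # lines is empty or starts with a marker line
--     out = []
--     while lines:
--         head, rest = lines[0], lines[1:]
--         i = 0
--         while i < len(rest) and not _is_marker(rest[i]):
--             i += 1
--         out.append('\n'.join([head] + rest[:i]))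
--         lines = rest[i:]
--     return out
-- ===== Notes on version B (the rewrite author's own statement) =====
-- stated objective: alternative
-- what changed: B replaces A's stateful flag/flush loop with a two-phase decomposition: drop the preamble before the first marker, then repeatedly span off each marker-headed chunk and join it.
import Mathlib
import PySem

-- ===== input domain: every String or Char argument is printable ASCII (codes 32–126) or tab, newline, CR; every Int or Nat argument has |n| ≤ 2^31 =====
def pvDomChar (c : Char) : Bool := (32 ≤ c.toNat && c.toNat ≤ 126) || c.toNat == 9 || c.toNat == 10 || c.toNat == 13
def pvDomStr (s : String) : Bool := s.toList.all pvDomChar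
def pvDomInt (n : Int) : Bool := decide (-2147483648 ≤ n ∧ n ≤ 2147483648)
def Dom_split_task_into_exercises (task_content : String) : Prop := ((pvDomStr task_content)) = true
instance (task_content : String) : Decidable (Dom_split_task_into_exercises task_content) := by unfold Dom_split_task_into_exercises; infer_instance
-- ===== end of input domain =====

-- B replaces A's stateful flag/flush loop with a two-phase decomposition (drop the
-- preamble, then span off one marker-headed chunk at a time); same cost, no speed claim.


-- line.strip().startswith('#### Exercise')  (shared by both Pythons, textually identical)
def pvIsMarker (line : String) : Bool :=
  PySem.Str.startswith (PySem.Str.strip line) "#### Exercise"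

-- '\n'.join(cur)
def pvJoin (cur : List String) : String := PySem.Str.join "\n" cur

-- ===== PORT A =====
-- A's loop body: state = (exercises, current_exercise, in_exercise)
def pvStepA (st : List String × List String × Bool) (line : String) :
    List String × List String × Bool :=
  let exs := st.1
  let cur := st.2.1
  let inEx := st.2.2
  let exs := if pvIsMarker line then (if cur ≠ [] then exs ++ [pvJoin cur] else exs) else exs
  let cur := if pvIsMarker line then [] else cur
  let inEx := if pvIsMarker line then true else inEx
  if inEx then (exs, cur ++ [line], inEx) else (exs, cur, inEx)

def split_task_into_exercises (task_content : String) : List String :=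
  let lines := (PySem.Str.split? task_content "\n").getD []
  let st := lines.foldl pvStepA ([], [], false)
  if st.2.1 ≠ [] then st.1 ++ [pvJoin st.2.1] else st.1

-- ===== PORT B =====
-- _drop_preamble's index scan + slice computes exactly List.dropWhile;
-- _chunks's inner index scan + the two slices compute exactly takeWhile / dropWhile (span).
def pvChunks : List String → List (List String)
  | [] => []
  | l :: ls =>
      (l :: ls.takeWhile (fun x => !pvIsMarker x)) ::
      pvChunks (ls.dropWhile (fun x => !pvIsMarker x))
termination_by xs => xs.length
decreasing_by
  exact Nat.lt_succ_of_le (List.length_dropWhile_le _ _)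

def split_task_into_exercises_alt (task_content : String) : List String :=
  let lines := (PySem.Str.split? task_content "\n").getD []
  (pvChunks (lines.dropWhile (fun l => !pvIsMarker l))).map pvJoin

-- ===== PRECONDITION & SPEC =====
def Spec_split_task_into_exercises (task_content : String) (out : List String) : Prop := out = split_task_into_exercises_alt task_content
instance (task_content : String) (out : List String) : Decidable (Spec_split_task_into_exercises task_content out) := by unfold Spec_split_task_into_exercises; infer_instance

-- ===== CLAIM (what is proved, stated in full; the proofs are below) =====
def Claim_equal_split_task_into_exercises : Prop := ∀ (task_content : String), Dom_split_task_into_exercises task_content → Spec_split_task_into_exercises task_content (split_task_into_exercises task_content)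

-- ===== LEMMAS AND PROOFS =====

-- A's flush at the end of the loop
def pvFlush (st : List String × List String × Bool) : List String :=
  if st.2.1 ≠ [] then st.1 ++ [pvJoin st.2.1] else st.1

-- while in_exercise is false, non-marker lines leave A's state untouched
lemma foldA_skip (ls : List String) (exs cur : List String) :
    List.foldl pvStepA (exs, cur, false) ls =
      List.foldl pvStepA (exs, cur, false) (ls.dropWhile (fun l => !pvIsMarker l)) := by
  induction ls with
  | nil => rfl
  | cons l ls ih =>
      by_cases h : pvIsMarker l
      · simp [h]
      · simp only [List.foldl_cons, List.dropWhile_cons, h, Bool.not_false, if_true]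
        rw [show pvStepA (exs, cur, false) l = (exs, cur, false) by
          simp [pvStepA, h]]
        exact ih

-- main invariant: inside an exercise, the fold + flush produces the span chunks
lemma foldA_inside (ls : List String) : ∀ (exs cur : List String), cur ≠ [] →
    pvFlush (List.foldl pvStepA (exs, cur, true) ls) =
      exs ++ ((cur ++ ls.takeWhile (fun x => !pvIsMarker x)) ::
              pvChunks (ls.dropWhile (fun x => !pvIsMarker x))).map pvJoin := by
  induction ls with
  | nil =>
      intro exs cur hc
      simp [pvFlush, pvChunks, hc]
  | cons l ls ih =>
      intro exs cur hc
      by_cases h : pvIsMarker l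
      · -- marker: flush cur, start a new chunk at l
        simp only [List.foldl_cons]
        rw [show pvStepA (exs, cur, true) l = (exs ++ [pvJoin cur], [l], true) by
          simp [pvStepA, h, hc]]
        rw [ih (exs ++ [pvJoin cur]) [l] (by simp)]
        simp [h, pvChunks]
      · -- non-marker: extend cur
        simp only [List.foldl_cons]
        rw [show pvStepA (exs, cur, true) l = (exs, cur ++ [l], true) by
          simp [pvStepA, h]]
        rw [ih exs (cur ++ [l]) (by simp)]
        simp [h]

lemma marker_of_dropWhile_cons :
    ∀ (xs : List String) (l : String) (ls : List String),
      xs.dropWhile (fun x => !pvIsMarker x) = l :: ls → pvIsMarker l = true := by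
  intro xs
  induction xs with
  | nil => intro l ls h; simp at h
  | cons a as ih =>
      intro l ls h
      by_cases hp : pvIsMarker a
      · rw [List.dropWhile_cons_of_neg (by simp [hp])] at h
        cases h
        exact hp
      · rw [List.dropWhile_cons_of_pos (by simp [hp])] at h
        exact ih _ _ h

lemma runs_eq (lines : List String) :
    pvFlush (lines.foldl pvStepA ([], [], false)) =
      (pvChunks (lines.dropWhile (fun l => !pvIsMarker l))).map pvJoin := by
  rw [foldA_skip lines [] []]
  cases hdw : lines.dropWhile (fun l => !pvIsMarker l) with
  | nil => simp [pvFlush, pvChunks]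
  | cons l ls =>
      have hm : pvIsMarker l = true := marker_of_dropWhile_cons lines l ls hdw
      simp only [List.foldl_cons]
      rw [show pvStepA ([], [], false) l = ([], [l], true) by
        simp [pvStepA, hm]]
      rw [foldA_inside ls [] [l] (by simp)]
      simp [pvChunks]

lemma ports_agree (task_content : String) :
    split_task_into_exercises task_content = split_task_into_exercises_alt task_content := by
  unfold split_task_into_exercises split_task_into_exercises_alt
  exact runs_eq _

-- ===== VERDICT (by name: the statement is the Claim_ definition above) =====
theorem split_task_into_exercises_spec : Claim_equal_split_task_into_exercises := by
  intro tc _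
  exact ports_agree tc
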